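-- pv_equiv track=rewrite | github.com/kiran-agentic/agentcouncil | agentcouncil/convergence.py | _derive_verdict
-- ===== SOURCE A (Python) =====
-- def _derive_verdict(statuses: dict[str, str]) -> str:
--     """Derive final verdict from finding statuses."""
--     if not statuses:
--         return "pass"
--     if all(s in ("verified", "wont_fix") for s in statuses.values()):
--         return "pass"
--     if any(s in ("open", "reopened") for s in statuses.values()):
--         return "revise"
--     return "pass"
-- ===== SOURCE B (Python) =====
-- def _derive_verdict(statuses: dict[str, str]) -> str:
--     """Derive final verdict from finding statuses."""
--     return "revise" if any(s in ("open", "reopened") for s in statuses.values()) else "pass"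
-- ===== Notes on version B (the rewrite author's own statement) =====
-- stated objective: simpler
-- what changed: Replaced the empty-dict guard and the two sequential all()/any() scans with a single any() scan: the all(verified/wont_fix) branch can only return 'pass' when no value is open/reopened, so the verdict is 'revise' iff some value is 'open' or 'reopened'.
import Mathlib
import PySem

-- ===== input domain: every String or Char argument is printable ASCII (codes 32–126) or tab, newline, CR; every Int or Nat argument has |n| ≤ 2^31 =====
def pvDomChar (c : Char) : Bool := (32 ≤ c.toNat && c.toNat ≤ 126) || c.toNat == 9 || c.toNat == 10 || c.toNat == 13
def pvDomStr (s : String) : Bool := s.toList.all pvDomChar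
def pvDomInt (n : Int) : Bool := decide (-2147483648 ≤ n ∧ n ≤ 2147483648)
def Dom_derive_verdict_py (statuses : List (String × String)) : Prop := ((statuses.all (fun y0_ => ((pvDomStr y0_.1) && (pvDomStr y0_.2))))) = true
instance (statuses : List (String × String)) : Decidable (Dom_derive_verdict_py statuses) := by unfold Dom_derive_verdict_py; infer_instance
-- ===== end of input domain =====

-- ===== PORT A =====
-- Port of A: empty-dict guard, then all(verified/wont_fix) scan, then any(open/reopened) scan.
def derive_verdict_py (statuses : List (String × String)) : String :=
  let d := PySem.Dict.ofList statuses
  if d.size == 0 then "pass"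
  else if (PySem.Dict.values d).all (fun s => s == "verified" || s == "wont_fix") then "pass"
  else if (PySem.Dict.values d).any (fun s => s == "open" || s == "reopened") then "revise"
  else "pass"

-- ===== PORT B =====
-- B: single any() scan; "revise" iff some status is "open" or "reopened".
def derive_verdict_py_alt (statuses : List (String × String)) : String :=
  if (PySem.Dict.values (PySem.Dict.ofList statuses)).any (fun s => s == "open" || s == "reopened") then "revise" else "pass"

-- ===== PRECONDITION & SPEC =====
def Spec_derive_verdict_py (statuses : List (String × String)) (out : String) : Prop := out = derive_verdict_py_alt statuses
instance (statuses : List (String × String)) (out : String) : Decidable (Spec_derive_verdict_py statuses out) := by unfold Spec_derive_verdict_py; infer_instance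

-- ===== CLAIM (what is proved, stated in full; the proofs are below) =====
def Claim_equal_derive_verdict_py : Prop := ∀ (statuses : List (String × String)), Dom_derive_verdict_py statuses → Spec_derive_verdict_py statuses (derive_verdict_py statuses)

-- ===== LEMMAS AND PROOFS =====

-- Over any value list: A's three-branch decision equals B's single any() decision.
theorem verdict_branches_eq (vs : List String) :
    (if vs.length == 0 then "pass"
     else if vs.all (fun s => s == "verified" || s == "wont_fix") then "pass"
     else if vs.any (fun s => s == "open" || s == "reopened") then "revise"
     else "pass")
    = (if vs.any (fun s => s == "open" || s == "reopened") then "revise" else "pass") := by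
  by_cases h : vs.any (fun s => s == "open" || s == "reopened") = true
  · obtain ⟨s, hs, hp⟩ := List.any_eq_true.mp h
    have hne : vs.length ≠ 0 := by
      intro hl; rw [List.length_eq_zero_iff] at hl; subst hl; exact absurd hs (List.not_mem_nil)
    have hall : vs.all (fun s => s == "verified" || s == "wont_fix") = false := by
      refine List.all_eq_false.mpr ⟨s, hs, ?_⟩
      rcases (by simpa using hp : s = "open" ∨ s = "reopened") with h1 | h1 <;>
        · subst h1; decide
    simp [h, hall, hne]
  · have h' : vs.any (fun s => s == "open" || s == "reopened") = false := by
      simpa using h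
    simp [h']

-- ===== VERDICT (by name: the statement is the Claim_ definition above) =====
theorem derive_verdict_py_spec : Claim_equal_derive_verdict_py := by
  intro statuses _
  unfold Spec_derive_verdict_py derive_verdict_py derive_verdict_py_alt
  have := verdict_branches_eq (PySem.Dict.values (PySem.Dict.ofList statuses))
  simpa [PySem.Dict.size, PySem.Dict.values] using this
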